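-- pv_equiv track=rewrite | github.com/erin-le/gem5-website | add-sphinx-docs.py | remove_searchbar
-- ===== SOURCE A (Python) =====
-- def remove_searchbar(html):
--     search_flag = False
--     for index, line in enumerate(html):
--         if '<div id="searchbox" style="display: none" role="search">' in line:
--             search_flag = True
--         if search_flag == True:
--             html[index] = ""
--         if (
--             "<script>document.getElementById('searchbox').style.display = \"block\"</script>"
--             in line
--         ):
--             search_flag = False
--     return html
-- ===== SOURCE B (Python) =====
-- def remove_searchbar(html):
--     START = '<div id="searchbox" style="display: none" role="search">'
--     END = "<script>document.getElementById('searchbox').style.display = \"block\"</script>"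
--     # stage 1: split the lines into chunks, each chunk closed by an end-marker line
--     chunks = []
--     cur = []
--     for line in html:
--         cur.append(line)
--         if END in line:
--             chunks.append(cur)
--             cur = []
--     if cur:
--         chunks.append(cur)
--     # stage 2: in each chunk, blank everything from the first start-marker line to the chunk's end
--     out = []
--     for ch in chunks:
--         k = 0
--         while k < len(ch) and START not in ch[k]:
--             k += 1
--         if k == len(ch):
--             out.extend(ch)
--         else:
--             out.extend(ch[:k])
--             out.extend([""] * (len(ch) - k))
--     html[:] = out
--     return html
-- ===== Notes on version B (the rewrite author's own statement) =====
-- stated objective: alternative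
-- what changed: Replaces A's online flag-toggling pass with a staged split-transform-join: first split the lines into chunks closed by end-marker lines, then in each chunk blank from the first start-marker line to the chunk end, then concatenate and assign back.
import Mathlib
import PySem

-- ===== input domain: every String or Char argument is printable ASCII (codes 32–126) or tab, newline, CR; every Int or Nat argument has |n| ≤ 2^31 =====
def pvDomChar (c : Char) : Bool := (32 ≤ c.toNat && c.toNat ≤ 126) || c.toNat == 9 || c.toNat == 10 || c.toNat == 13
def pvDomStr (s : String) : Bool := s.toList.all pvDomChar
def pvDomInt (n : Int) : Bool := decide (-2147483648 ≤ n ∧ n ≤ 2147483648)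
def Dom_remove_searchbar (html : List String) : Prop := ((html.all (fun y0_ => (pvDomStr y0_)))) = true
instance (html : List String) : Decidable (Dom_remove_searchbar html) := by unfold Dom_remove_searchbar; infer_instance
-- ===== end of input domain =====

-- B replaces A's online flag-toggling pass with a staged split-transform-join (split into
-- chunks closed by end-marker lines, blank each chunk from its first start-marker line,
-- concatenate); same return value. Both Pythons leave `html` mutated to the same final
-- content (A blanks entry by entry, B assigns the whole list once); the ports model the
-- returned list.

def pvStartMark : String := "<div id=\"searchbox\" style=\"display: none\" role=\"search\">"
def pvEndMark : String := "<script>document.getElementById('searchbox').style.display = \"block\"</script>"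

-- ===== PORT A =====
-- A's for-loop over enumerate(html) with the boolean search_flag; html[index] = "" is
-- modelled by emitting "" at that position (later lines read by the loop are unchanged).
def rsAuxA (flag : Bool) : List String → List String
  | [] => []
  | line :: rest =>
    let flag1 := if PySem.Str.isIn pvStartMark line then true else flag
    let out := if flag1 then "" else line
    let flag2 := if PySem.Str.isIn pvEndMark line then false else flag1
    out :: rsAuxA flag2 rest

def remove_searchbar (html : List String) : List String := rsAuxA false html

-- ===== PORT B =====
-- B stage 1: the for-loop appending to `cur` and closing a chunk at each end-marker line
-- (`cur` is kept reversed, Python's append = cons; the trailing `if cur:` is the [] case).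
def rsSplit (cur : List String) : List String → List (List String)
  | [] => if cur.isEmpty then [] else [cur.reverse]
  | l :: rest =>
    if PySem.Str.isIn pvEndMark l then (l :: cur).reverse :: rsSplit [] rest
    else rsSplit (l :: cur) rest

-- B stage 2 body: the while-scan for the first start-marker line (takeWhile) and the
-- k == len(ch) test, else ch[:k] plus (len(ch) - k) blanks.
def rsBlankChunk (ch : List String) : List String :=
  let pre := ch.takeWhile (fun l => !(PySem.Str.isIn pvStartMark l))
  if pre.length = ch.length then ch else pre ++ List.replicate (ch.length - pre.length) ""

-- out.extend per chunk = flatMap over the chunk list.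
def remove_searchbar_alt (html : List String) : List String :=
  (rsSplit [] html).flatMap rsBlankChunk

-- ===== PRECONDITION & SPEC =====
def Spec_remove_searchbar (html : List String) (out : List String) : Prop := out = remove_searchbar_alt html
instance (html : List String) (out : List String) : Decidable (Spec_remove_searchbar html out) := by unfold Spec_remove_searchbar; infer_instance

-- ===== CLAIM (what is proved, stated in full; the proofs are below) =====
def Claim_equal_remove_searchbar : Prop := ∀ (html : List String), Dom_remove_searchbar html → Spec_remove_searchbar html (remove_searchbar html)

-- ===== LEMMAS AND PROOFS =====

theorem rsBlankChunk_nil : rsBlankChunk [] = [] := by simp [rsBlankChunk]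

theorem rsBlankChunk_cons_pass (x : String) (xs : List String)
    (hx : PySem.Chars.isIn pvStartMark.toList x.toList = false) :
    rsBlankChunk (x :: xs) = x :: rsBlankChunk xs := by
  unfold rsBlankChunk
  simp only [PySem.Str.isIn_eq, List.takeWhile_cons, hx, Bool.not_false, if_true,
    List.length_cons]
  by_cases h : (xs.takeWhile (fun l => !(PySem.Chars.isIn pvStartMark.toList l.toList))).length = xs.length
  · simp [h]
  · simp [h, Nat.succ_sub_succ]

theorem rsBlankChunk_blockAll (x : String) (ys : List String)
    (hx : PySem.Chars.isIn pvStartMark.toList x.toList = true) :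
    rsBlankChunk (x :: ys) = List.replicate (ys.length + 1) "" := by
  unfold rsBlankChunk
  simp [hx]

theorem rsBlankChunk_append_one (xs : List String) (l : String) :
    rsBlankChunk (xs ++ [l])
      = rsBlankChunk xs
        ++ [if (xs.any (fun s => PySem.Chars.isIn pvStartMark.toList s.toList)
                || PySem.Chars.isIn pvStartMark.toList l.toList) then "" else l] := by
  induction xs with
  | nil =>
    by_cases hl : PySem.Chars.isIn pvStartMark.toList l.toList = true
    · rw [List.nil_append, rsBlankChunk_blockAll l [] hl]
      simp [rsBlankChunk_nil, hl]
    · simp only [Bool.not_eq_true] at hl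
      rw [List.nil_append, rsBlankChunk_cons_pass l [] hl]
      simp [rsBlankChunk_nil, hl]
  | cons x xs ih =>
    by_cases hx : PySem.Chars.isIn pvStartMark.toList x.toList = true
    · rw [List.cons_append, rsBlankChunk_blockAll x (xs ++ [l]) hx,
        rsBlankChunk_blockAll x xs hx]
      simp [hx, List.replicate_succ']
    · simp only [Bool.not_eq_true] at hx
      rw [List.cons_append, rsBlankChunk_cons_pass x (xs ++ [l]) hx,
        rsBlankChunk_cons_pass x xs hx, ih]
      simp [hx]

theorem rs_key (rest : List String) : ∀ (cur : List String),
    (rsSplit cur rest).flatMap rsBlankChunk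
      = rsBlankChunk cur.reverse
        ++ rsAuxA (cur.any (fun s => PySem.Chars.isIn pvStartMark.toList s.toList)) rest := by
  induction rest with
  | nil =>
    intro cur
    cases cur with
    | nil => simp [rsSplit, rsBlankChunk_nil, rsAuxA]
    | cons c cs => simp [rsSplit, rsAuxA]
  | cons l rest ih =>
    intro cur
    by_cases he : PySem.Chars.isIn pvEndMark.toList l.toList = true
    · by_cases hs : PySem.Chars.isIn pvStartMark.toList l.toList = true
      · simp only [rsSplit, rsAuxA, PySem.Str.isIn_eq, he, hs, if_true,
          List.flatMap_cons, ih [], List.reverse_cons, rsBlankChunk_append_one]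
        simp [rsBlankChunk_nil, List.any_reverse]
      · simp only [Bool.not_eq_true] at hs
        simp only [rsSplit, rsAuxA, PySem.Str.isIn_eq, he, hs, if_true,
          List.flatMap_cons, ih [], List.reverse_cons, rsBlankChunk_append_one]
        simp [rsBlankChunk_nil, List.any_reverse]
    · simp only [Bool.not_eq_true] at he
      have hsplit : rsSplit cur (l :: rest) = rsSplit (l :: cur) rest := by
        simp [rsSplit, he]
      rw [hsplit, ih (l :: cur)]
      by_cases hs : PySem.Chars.isIn pvStartMark.toList l.toList = true
      · simp [rsAuxA, List.reverse_cons, rsBlankChunk_append_one, List.any_reverse, hs, he]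
      · simp only [Bool.not_eq_true] at hs
        simp [rsAuxA, List.reverse_cons, rsBlankChunk_append_one, List.any_reverse, hs, he]

-- ===== VERDICT (by name: the statement is the Claim_ definition above) =====
theorem remove_searchbar_spec : Claim_equal_remove_searchbar := by
  intro html _
  unfold Spec_remove_searchbar remove_searchbar remove_searchbar_alt
  rw [rs_key html []]
  simp [rsBlankChunk_nil]
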